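-- pv_equiv track=rewrite | github.com/shrishti-04/Python_DSA | Sorting/HackerrackQues/closestNum.py | closestNum
-- ===== SOURCE A (Python) =====
-- def closestNum(arr):
--     arr.sort()
--     min_diff = float('inf')
--     pairs = []
--
--     for i in range(len(arr) - 1):
--         diff = arr[i+1] - arr[i]
--         if(diff < min_diff):
--             min_diff = diff
--             pairs = [(arr[i], arr[i+1])]
--         elif(diff == min_diff):
--             pairs.append((arr[i], arr[i+1]))
--
--     result = []
--     for pair in pairs:
--         result.extend(pair)
--
--     return result
-- ===== SOURCE B (Python) =====
-- def closestNum(arr):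
--     arr.sort()
--     if len(arr) < 2:
--         return []
--     min_diff = min(arr[i + 1] - arr[i] for i in range(len(arr) - 1))
--     return [x
--             for i in range(len(arr) - 1)
--             if arr[i + 1] - arr[i] == min_diff
--             for x in (arr[i], arr[i + 1])]
-- ===== Notes on version B (the rewrite author's own statement) =====
-- stated objective: simpler
-- what changed: Replaces the single stateful scan (running min with conditional reset/append of a pairs list, then a flattening loop) by two stateless passes: min() over the adjacent differences, then one flattened comprehension selecting the minimal-gap pairs.
import Mathlib
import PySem

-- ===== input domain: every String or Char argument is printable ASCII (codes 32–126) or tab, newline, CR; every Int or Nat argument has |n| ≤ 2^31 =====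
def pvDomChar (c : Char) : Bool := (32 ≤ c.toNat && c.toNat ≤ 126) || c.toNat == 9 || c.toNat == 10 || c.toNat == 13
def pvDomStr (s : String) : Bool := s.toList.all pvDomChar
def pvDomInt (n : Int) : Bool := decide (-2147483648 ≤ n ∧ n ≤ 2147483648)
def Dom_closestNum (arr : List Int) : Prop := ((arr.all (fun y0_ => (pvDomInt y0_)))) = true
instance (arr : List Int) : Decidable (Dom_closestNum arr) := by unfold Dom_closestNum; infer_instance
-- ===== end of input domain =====

-- B replaces A's single stateful scan (running min with reset/append of a pairs list, then a
-- flattening loop) by two stateless passes: min() of the adjacent gaps, then one flattened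
-- comprehension — simpler. Both A and B sort the caller's list in place (same side effect);
-- the claim is about the return value.

-- ===== PORT A =====
-- A's loop state: (min_diff, pairs); `none` plays float('inf').
def stepA (st : Option Int × List (Int × Int)) (xy : Int × Int) : Option Int × List (Int × Int) :=
  let d := xy.2 - xy.1
  match st.1 with
  | none => (some d, [(xy.1, xy.2)])
  | some m =>
      if d < m then (some d, [(xy.1, xy.2)])
      else if d = m then (st.1, st.2 ++ [(xy.1, xy.2)])
      else (st.1, st.2)

def closestNum (arr : List Int) : List Int :=
  let s := PySem.List.sorted arr (fun x => x) false
  let st := (PySem.List.pyRange 0 ((s.length : Int) - 1) 1).foldl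
      (fun st i => stepA st (PySem.List.pyGetD s i 0, PySem.List.pyGetD s (i + 1) 0))
      (none, [])
  st.2.foldl (fun r p => r ++ [p.1, p.2]) []

-- ===== PORT B =====
def closestNum_alt (arr : List Int) : List Int :=
  let s := PySem.List.sorted arr (fun x => x) false
  if s.length < 2 then []
  else
    let diffs := (PySem.List.pyRange 0 ((s.length : Int) - 1) 1).map
        (fun i => PySem.List.pyGetD s (i + 1) 0 - PySem.List.pyGetD s i 0)
    match PySem.List.min? diffs (fun x => x) with
    | none => []
    | some md =>
        (PySem.List.pyRange 0 ((s.length : Int) - 1) 1).flatMap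
          (fun i =>
            if PySem.List.pyGetD s (i + 1) 0 - PySem.List.pyGetD s i 0 = md
            then [PySem.List.pyGetD s i 0, PySem.List.pyGetD s (i + 1) 0]
            else [])

-- ===== PRECONDITION & SPEC =====
def Spec_closestNum (arr : List Int) (out : List Int) : Prop := out = closestNum_alt arr
instance (arr : List Int) (out : List Int) : Decidable (Spec_closestNum arr out) := by unfold Spec_closestNum; infer_instance

-- ===== CLAIM (what is proved, stated in full; the proofs are below) =====
def Claim_equal_closestNum : Prop := ∀ (arr : List Int), Dom_closestNum arr → Spec_closestNum arr (closestNum arr)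

-- ===== LEMMAS AND PROOFS =====

-- running minimum of m and the gaps of a pair list
def minL (m : Int) (l : List (Int × Int)) : Int :=
  l.foldl (fun a p => min a (p.2 - p.1)) m

theorem minL_le (l : List (Int × Int)) : ∀ m : Int, minL m l ≤ m := by
  induction l with
  | nil => intro m; simp [minL]
  | cons p t ih =>
      intro m
      have h := ih (min m (p.2 - p.1))
      simp only [minL, List.foldl_cons] at h ⊢
      exact le_trans h (min_le_left _ _)

-- the adjacent-index pairs of the loop are s.zip s.tail (Nat side)
theorem rangeAdj (s : List Int) :
    (List.range (s.length - 1)).map (fun k => (s.getD k 0, s.getD (k + 1) 0)) = s.zip s.tail := by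
  induction s with
  | nil => simp
  | cons a rest ih =>
      cases rest with
      | nil => simp
      | cons b t =>
          have hlen : (a :: b :: t).length - 1 = t.length + 1 := by simp
          rw [hlen, List.range_succ_eq_map, List.map_cons, List.map_map]
          have hlen2 : (b :: t).length - 1 = t.length := by simp
          rw [hlen2] at ih
          rw [List.tail_cons, List.zip_cons_cons]
          refine congrArg₂ List.cons (by simp) ?_
          rw [show ((fun k => ((a :: b :: t).getD k 0, (a :: b :: t).getD (k + 1) 0)) ∘ Nat.succ)
                = (fun k => ((b :: t).getD k 0, (b :: t).getD (k + 1) 0)) from by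
              funext k; simp [Function.comp]]
          exact ih

-- Int side: the pyRange index loop over s visits exactly s.zip s.tail
theorem adjIdx (s : List Int) :
    (PySem.List.pyRange 0 ((s.length : Int) - 1) 1).map
      (fun i => (PySem.List.pyGetD s i 0, PySem.List.pyGetD s (i + 1) 0)) = s.zip s.tail := by
  rw [PySem.List.pyRange_one, List.map_map]
  have hn : (((s.length : Int) - 1) - 0).toNat = s.length - 1 := by omega
  rw [hn]
  have hfun : ((fun i => (PySem.List.pyGetD s i 0, PySem.List.pyGetD s (i + 1) 0)) ∘ fun k : Nat => (0 : Int) + k)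
      = (fun k : Nat => (s.getD k 0, s.getD (k + 1) 0)) := by
    funext k
    simp only [Function.comp, zero_add]
    rw [show ((k : Int) + 1) = ((k + 1 : Nat) : Int) from by push_cast; ring]
    rw [PySem.List.pyGetD_natCast, PySem.List.pyGetD_natCast]
  rw [hfun, rangeAdj]

-- closed form of A's scan from a proper (some) state
theorem foldA (l : List (Int × Int)) : ∀ (m : Int) (ps : List (Int × Int)),
    l.foldl stepA (some m, ps) =
      (some (minL m l),
       (if minL m l = m then ps else []) ++ l.filter (fun p => p.2 - p.1 = minL m l)) := by
  induction l with
  | nil => intro m ps; simp [minL]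
  | cons p t ih =>
      intro m ps
      obtain ⟨x, y⟩ := p
      have hmin : minL m ((x, y) :: t) = minL (min m (y - x)) t := by simp [minL]
      rw [List.foldl_cons, hmin]
      by_cases h1 : y - x < m
      · have hstep : stepA (some m, ps) (x, y) = (some (y - x), [(x, y)]) := by
          simp [stepA, h1]
        have hle : minL (y - x) t ≤ y - x := by
          have := minL_le t (min m (y - x)); have hmd : min m (y - x) = y - x := by omega
          rw [hmd] at this; exact this
        have hmd : min m (y - x) = y - x := by omega
        rw [hmd, hstep, ih (y - x) [(x, y)]]
        have hne : minL (y - x) t ≠ m := by omega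
        by_cases h2 : minL (y - x) t = y - x
        · have h5 : (y - x : Int) ≠ m := by omega
          simp [hne, h2, h5]
        · have h2' : ¬ ((x, y).2 - (x, y).1 = minL (y - x) t) := by simp; omega
          simp [hne, h2, h2']
      · by_cases h2 : y - x = m
        · have hstep : stepA (some m, ps) (x, y) = (some m, ps ++ [(x, y)]) := by
            simp [stepA, h2]
          have hmd : min m (y - x) = m := by omega
          rw [hmd, hstep, ih m (ps ++ [(x, y)])]
          by_cases h3 : minL m t = m
          · have h4 : (x, y).2 - (x, y).1 = minL m t := by simp; omega
            simp [h3, h4]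
          · have h4 : ¬ ((x, y).2 - (x, y).1 = minL m t) := by simp; omega
            simp [h3, h4]
        · have hstep : stepA (some m, ps) (x, y) = (some m, ps) := by
            simp [stepA, h1, h2]
          have hle : minL m t ≤ m := minL_le t m
          have hmd : min m (y - x) = m := by omega
          rw [hmd, hstep, ih m ps]
          have h4 : ¬ ((x, y).2 - (x, y).1 = minL m t) := by simp; omega
          simp [h4]

-- comprehension with a guard = filter then flatten
theorem flatMap_if_filter {α β : Type} (l : List α) (c : α → Prop) [DecidablePred c] (g : α → List β) :
    l.flatMap (fun p => if c p then g p else []) = (l.filter (fun p => decide (c p))).flatMap g := by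
  induction l with
  | nil => rfl
  | cons a t ih =>
      by_cases h : c a
      · simp [h, ih]
      · simp [h, ih]

-- zip s s.tail is empty iff the list has fewer than two elements
theorem zip_tail_eq_nil_iff (s : List Int) : s.zip s.tail = [] ↔ s.length < 2 := by
  cases s with
  | nil => simp
  | cons a t =>
      cases t with
      | nil => simp
      | cons b u => simp

-- ===== VERDICT (by name: the statement is the Claim_ definition above) =====
theorem closestNum_spec : Claim_equal_closestNum := by
  intro arr _
  unfold Spec_closestNum closestNum closestNum_alt
  set s := PySem.List.sorted arr (fun x => x) false with hs
  have hfoldA :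
      (PySem.List.pyRange 0 ((s.length : Int) - 1) 1).foldl
        (fun st i => stepA st (PySem.List.pyGetD s i 0, PySem.List.pyGetD s (i + 1) 0))
        ((none : Option Int), ([] : List (Int × Int)))
      = (s.zip s.tail).foldl stepA (none, []) := by
    rw [← adjIdx s, List.foldl_map]
  have hdiffs :
      (PySem.List.pyRange 0 ((s.length : Int) - 1) 1).map
        (fun i => PySem.List.pyGetD s (i + 1) 0 - PySem.List.pyGetD s i 0)
      = (s.zip s.tail).map (fun p => p.2 - p.1) := by
    rw [← adjIdx s, List.map_map]; rfl
  simp only [hfoldA, hdiffs]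
  by_cases hlen : s.length < 2
  · have hz : s.zip s.tail = [] := (zip_tail_eq_nil_iff s).mpr hlen
    simp [hz, hlen]
  · have hz : s.zip s.tail ≠ [] := fun h => hlen ((zip_tail_eq_nil_iff s).mp h)
    obtain ⟨⟨x, y⟩, rest, hzeq⟩ : ∃ p rest, s.zip s.tail = p :: rest := by
      cases hzz : s.zip s.tail with
      | nil => exact absurd hzz hz
      | cons p rest => exact ⟨p, rest, rfl⟩
    rw [hzeq]
    have hfirst : stepA ((none : Option Int), ([] : List (Int × Int))) (x, y) = (some (y - x), [(x, y)]) := by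
      simp [stepA]
    rw [List.foldl_cons, hfirst, foldA rest (y - x) [(x, y)], if_neg hlen]
    set M := minL (y - x) rest with hM
    have hmin? : PySem.List.min? (((x, y).2 - (x, y).1) :: rest.map (fun p => p.2 - p.1)) (fun x => x)
        = some M := by
      rw [PySem.List.min?_id_cons, List.foldl_map]; rfl
    simp only [List.map_cons]
    simp only [hmin?]
    have hflat :
        (PySem.List.pyRange 0 ((s.length : Int) - 1) 1).flatMap
          (fun i =>
            if PySem.List.pyGetD s (i + 1) 0 - PySem.List.pyGetD s i 0 = M
            then [PySem.List.pyGetD s i 0, PySem.List.pyGetD s (i + 1) 0]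
            else [])
        = (s.zip s.tail).flatMap (fun p => if p.2 - p.1 = M then [p.1, p.2] else []) := by
      rw [← adjIdx s, List.flatMap_map]
    rw [PySem.List.foldl_append_eq_flatMap, hflat, hzeq, List.flatMap_cons,
        flatMap_if_filter rest (fun p => p.2 - p.1 = M) (fun p => [p.1, p.2])]
    by_cases hMd : M = y - x
    · simp [hMd]
    · have hMd' : ¬ ((x, y).2 - (x, y).1 = M) := by simp; omega
      simp [hMd, hMd']
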